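-- pv_equiv track=rewrite | github.com/nhartz24/Python | ExamI_S19_soltns.py | for_loop
-- ===== SOURCE A (Python) =====
-- def for_loop(s):
--     A='' #empty string
--     B='' #empty string
--     for x in s:
--         if x.isupper():
--             A += x
--         elif x.isdigit():
--             B += x
--     return B + ' ' + A #quotes contain space
-- ===== SOURCE B (Python) =====
-- def for_loop(s):
--     b = ''.join(c for c in s if c.isdigit())
--     a = ''.join(c for c in s if c.isupper())
--     return b + ' ' + a
-- ===== Notes on version B (the rewrite author's own statement) =====
-- stated objective: simpler
-- what changed: Replaces A's single interleaved loop maintaining two growing accumulators with two independent filtering passes (digits, then uppercase letters) joined once.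
import Mathlib
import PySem

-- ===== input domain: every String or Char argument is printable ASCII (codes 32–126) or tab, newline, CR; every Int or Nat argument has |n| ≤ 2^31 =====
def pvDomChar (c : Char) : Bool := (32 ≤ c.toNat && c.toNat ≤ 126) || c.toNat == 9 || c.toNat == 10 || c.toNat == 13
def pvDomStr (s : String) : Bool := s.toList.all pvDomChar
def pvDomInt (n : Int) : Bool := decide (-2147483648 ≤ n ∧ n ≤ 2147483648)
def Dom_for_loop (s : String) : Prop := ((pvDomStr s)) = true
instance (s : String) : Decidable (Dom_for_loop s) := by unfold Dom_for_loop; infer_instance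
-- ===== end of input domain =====

-- ===== PORT A =====
-- A: one loop over s, appending each char to the uppercase accumulator A or the digit accumulator B.
def for_loop (s : String) : String :=
  let acc := s.toList.foldl
    (fun (ab : List Char × List Char) x =>
      if PySem.Chars.isupper x then (ab.1 ++ [x], ab.2)
      else if PySem.Chars.isdigit x then (ab.1, ab.2 ++ [x])
      else ab)
    ([], [])
  String.ofList (acc.2 ++ [' '] ++ acc.1)

-- ===== PORT B =====
-- B: two independent filtering passes, then one join.  Objective: simpler decomposition.
def for_loop_alt (s : String) : String :=
  String.ofList (s.toList.filter PySem.Chars.isdigit ++ [' '] ++ s.toList.filter PySem.Chars.isupper)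

-- ===== PRECONDITION & SPEC =====
def Spec_for_loop (s : String) (out : String) : Prop := out = for_loop_alt s
instance (s : String) (out : String) : Decidable (Spec_for_loop s out) := by unfold Spec_for_loop; infer_instance

-- ===== CLAIM (what is proved, stated in full; the proofs are below) =====
def Claim_equal_for_loop : Prop := ∀ (s : String), Dom_for_loop s → Spec_for_loop s (for_loop s)

-- ===== LEMMAS AND PROOFS =====

-- ===== VERDICT (by name: the statement is the Claim_ definition above) =====
lemma digit_not_upper (c : Char) (h : PySem.Chars.isdigit c = true) :
    PySem.Chars.isupper c = false := by
  simp only [PySem.Chars.isdigit, Bool.and_eq_true, decide_eq_true_eq] at h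
  have hlt : c < 'A' := lt_of_le_of_lt h.2 (by decide)
  simp [PySem.Chars.isupper, not_le.mpr hlt]

lemma for_loop_fold (l : List Char) (a b : List Char) :
    l.foldl
      (fun (ab : List Char × List Char) x =>
        if PySem.Chars.isupper x then (ab.1 ++ [x], ab.2)
        else if PySem.Chars.isdigit x then (ab.1, ab.2 ++ [x])
        else ab)
      (a, b)
    = (a ++ l.filter PySem.Chars.isupper, b ++ l.filter PySem.Chars.isdigit) := by
  induction l generalizing a b with
  | nil => simp
  | cons x xs ih =>
      by_cases hu : PySem.Chars.isupper x = true
      · simp [List.foldl_cons, hu, ih]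
        have : PySem.Chars.isdigit x = false := by
          by_contra h
          simp only [Bool.not_eq_false] at h
          exact absurd hu (by simp [digit_not_upper x h])
        simp [this]
      · simp only [Bool.not_eq_true] at hu
        by_cases hd : PySem.Chars.isdigit x = true
        · simp [List.foldl_cons, hu, hd, ih]
        · simp only [Bool.not_eq_true] at hd
          simp [List.foldl_cons, hu, hd, ih]

theorem for_loop_spec : Claim_equal_for_loop := by
  intro s _
  unfold Spec_for_loop for_loop for_loop_alt
  simp [for_loop_fold]
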